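-- pv_equiv track=rewrite | github.com/TessFerrandez/AdventOfCode-Python | 2023/day18.py | get_xs_ys
-- ===== SOURCE A (Python) =====
-- def get_xs_ys(instructions):
--     x, y = (0, 0)
--     xs = [x]
--     ys = [y]
--
--     outline = 0
--
--     for direction, distance, _ in instructions:
--         if direction == 'R':
--             x += distance
--         elif direction == 'L':
--             x -= distance
--         elif direction == 'U':
--             y -= distance
--         elif direction == 'D':
--             y += distance
--         outline += distance
--         xs.append(x)
--         ys.append(y)
--
--     return xs, ys, outline
-- ===== SOURCE B (Python) =====
-- _DELTAS = {'R': (1, 0), 'L': (-1, 0), 'U': (0, -1), 'D': (0, 1)}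
--
--
-- def _prefix_sums(moves):
--     out = [0]
--     acc = 0
--     for m in moves:
--         acc += m
--         out.append(acc)
--     return out
--
--
-- def get_xs_ys(instructions):
--     steps = [(_DELTAS.get(d, (0, 0)), n) for d, n, _ in instructions]
--     xs = _prefix_sums([dx * n for (dx, _), n in steps])
--     ys = _prefix_sums([dy * n for (_, dy), n in steps])
--     outline = sum(n for _, n in steps)
--     return xs, ys, outline
-- ===== Notes on version B (the rewrite author's own statement) =====
-- stated objective: idiomatic
-- what changed: Replaces the single loop that mutates x/y/xs/ys/outline with a map to a (delta, distance) step list via a direction lookup table, two independent prefix-sum passes for xs and ys, and a plain sum for the perimeter.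
import Mathlib
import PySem

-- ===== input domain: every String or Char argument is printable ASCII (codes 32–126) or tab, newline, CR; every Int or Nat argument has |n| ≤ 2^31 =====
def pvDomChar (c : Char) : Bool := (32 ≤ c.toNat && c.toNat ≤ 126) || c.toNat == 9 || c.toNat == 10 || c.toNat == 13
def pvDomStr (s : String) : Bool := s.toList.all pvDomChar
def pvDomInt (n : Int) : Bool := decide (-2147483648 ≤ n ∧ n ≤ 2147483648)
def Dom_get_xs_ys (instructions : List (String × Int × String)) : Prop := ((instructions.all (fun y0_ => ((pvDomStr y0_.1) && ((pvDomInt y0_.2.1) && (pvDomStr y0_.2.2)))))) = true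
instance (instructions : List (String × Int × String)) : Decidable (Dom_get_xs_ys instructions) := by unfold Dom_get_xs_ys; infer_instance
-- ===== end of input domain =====

-- B rewrites A's single mutating loop as a map to (delta, distance) steps plus separate prefix-sum and sum passes (idiomatic decomposition; same cost).

-- ===== PORT A =====
-- loop body of A, as a helper (elif chain in source order)
def pvStepA (st : Int × Int × List Int × List Int × Int) (ins : String × Int × String) :
    Int × Int × List Int × List Int × Int :=
  match st, ins with
  | (x, y, xs, ys, outline), (direction, distance, _) =>
    let xy : Int × Int :=
      if direction == "R" then (x + distance, y)
      else if direction == "L" then (x - distance, y)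
      else if direction == "U" then (x, y - distance)
      else if direction == "D" then (x, y + distance)
      else (x, y)
    (xy.1, xy.2, xs ++ [xy.1], ys ++ [xy.2], outline + distance)

def get_xs_ys (instructions : List (String × Int × String)) : List Int × List Int × Int :=
  let s := instructions.foldl pvStepA (0, 0, [(0 : Int)], [(0 : Int)], 0)
  (s.2.2.1, s.2.2.2.1, s.2.2.2.2)

-- ===== PORT B =====
def pvDeltas : PySem.Dict String (Int × Int) :=
  PySem.Dict.ofList [("R", (1, 0)), ("L", (-1, 0)), ("U", (0, -1)), ("D", (0, 1))]

-- helper _prefix_sums of Source B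
def pvPrefixSums (moves : List Int) : List Int :=
  (moves.foldl (fun (st : List Int × Int) m => (st.1 ++ [st.2 + m], st.2 + m)) ([0], 0)).1

def get_xs_ys_alt (instructions : List (String × Int × String)) : List Int × List Int × Int :=
  let steps := instructions.map (fun ins => (PySem.Dict.getD pvDeltas ins.1 (0, 0), ins.2.1))
  let xs := pvPrefixSums (steps.map (fun s => s.1.1 * s.2))
  let ys := pvPrefixSums (steps.map (fun s => s.1.2 * s.2))
  let outline := (steps.map (fun s => s.2)).sum
  (xs, ys, outline)

-- ===== PRECONDITION & SPEC =====
def Spec_get_xs_ys (instructions : List (String × Int × String)) (out : List Int × List Int × Int) : Prop := out = get_xs_ys_alt instructions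
instance (instructions : List (String × Int × String)) (out : List Int × List Int × Int) : Decidable (Spec_get_xs_ys instructions out) := by unfold Spec_get_xs_ys; infer_instance

-- ===== CLAIM (what is proved, stated in full; the proofs are below) =====
def Claim_equal_get_xs_ys : Prop := ∀ (instructions : List (String × Int × String)), Dom_get_xs_ys instructions → Spec_get_xs_ys instructions (get_xs_ys instructions)

-- ===== LEMMAS AND PROOFS =====

/-- Running prefix sums starting at `a`. -/
def pvScan (a : Int) : List Int → List Int
  | [] => []
  | m :: ms => (a + m) :: pvScan (a + m) ms

def pvDx (i : String × Int × String) : Int := (PySem.Dict.getD pvDeltas i.1 (0, 0)).1 * i.2.1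
def pvDy (i : String × Int × String) : Int := (PySem.Dict.getD pvDeltas i.1 (0, 0)).2 * i.2.1

lemma pvStepA_eq (x y o : Int) (xs ys : List Int) (i : String × Int × String) :
    pvStepA (x, y, xs, ys, o) i =
      (x + pvDx i, y + pvDy i, xs ++ [x + pvDx i], ys ++ [y + pvDy i], o + i.2.1) := by
  obtain ⟨d, n, c⟩ := i
  have hD : pvDeltas = PySem.Dict.mk [("R", (1, 0)), ("L", (-1, 0)), ("U", (0, -1)), ("D", (0, 1))] := by
    decide
  simp only [pvStepA, pvDx, pvDy, hD, PySem.Dict.getD_eq_get?_getD, PySem.Dict.get?_mk_cons]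
  split_ifs with h1 h2 h3 h4 <;> simp_all [PySem.Dict.get?] <;> ring_nf

lemma pvFoldA (l : List (String × Int × String)) :
    ∀ (x y o : Int) (xs ys : List Int),
    l.foldl pvStepA (x, y, xs, ys, o)
      = (x + (l.map pvDx).sum, y + (l.map pvDy).sum,
         xs ++ pvScan x (l.map pvDx), ys ++ pvScan y (l.map pvDy),
         o + (l.map (fun i => i.2.1)).sum) := by
  induction l with
  | nil => intro x y o xs ys; simp [pvScan]
  | cons i l ih =>
    intro x y o xs ys
    simp only [List.foldl_cons, pvStepA_eq, ih, List.map_cons, List.sum_cons, pvScan]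
    refine Prod.ext (by ring) (Prod.ext (by ring) ?_)
    simp only [List.append_assoc, List.cons_append, List.nil_append, Prod.mk.injEq]
    exact ⟨trivial, trivial, by ring⟩

lemma pvPrefixAux (ms : List Int) : ∀ (out : List Int) (acc : Int),
    (ms.foldl (fun (st : List Int × Int) m => (st.1 ++ [st.2 + m], st.2 + m)) (out, acc)).1
      = out ++ pvScan acc ms := by
  induction ms with
  | nil => intro out acc; simp [pvScan]
  | cons m ms ih => intro out acc; simp [List.foldl_cons, pvScan, ih]

-- ===== VERDICT (by name: the statement is the Claim_ definition above) =====
theorem get_xs_ys_spec : Claim_equal_get_xs_ys := by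
  intro l _
  show _ = _
  simp only [get_xs_ys, get_xs_ys_alt, pvPrefixSums, pvFoldA, pvPrefixAux,
    List.map_map]
  refine Prod.ext rfl (Prod.ext rfl ?_)
  simp [Function.comp_def]
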